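/- GENERATED by mk_final_copies.py from the proof of the farm's unit `decode_residue.10` (farm:decode_residue.10.1: Lemmas.lean) as the
   re-elaboration sweep compiled it — do not edit. -/
import Asan.CheckWalk
import Vorbis.Spec.Units.decode_residue_10
open X86 X86.User Asan Vorbis Vorbis.Spec Vorbis.Spec.DecodeResidue

set_option maxRecDepth 4000
set_option maxHeartbeats 4000000

namespace Vorbis.Spec.decode_residue_10

/-- `movsxd` of a small number held in a register is that number. -/
theorem sx_reg (j : Nat) (h : j < 2 ^ 31) :
    Word.ofBV (BitVec.signExtend 64 (Word.part Width.w32 (UInt64.ofNat j))) = UInt64.ofNat j := by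
  apply UInt64.toNat_inj.mp
  have e : (Word.part Width.w32 (UInt64.ofNat j)).toNat = j := by
    rw [Vorbis.toNat_part32, UInt64.toNat_ofNat']
    omega
  rw [Vorbis.Spec.toNat_sext32 _ (by omega), e, UInt64.toNat_ofNat']
  omega

/-- `movsxd` of a small number loaded from a 4-byte slot is that number. -/
theorem sx_mem (j : Nat) (h : j < 2 ^ 31) :
    Word.ofBV (BitVec.signExtend 64 (BitVec.ofNat 32 j)) = UInt64.ofNat j := by
  apply UInt64.toNat_inj.mp
  have e : (BitVec.ofNat 32 j).toNat = j := Vorbis.Spec.toNat_ofNat32 j (by omega)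
  rw [Vorbis.Spec.toNat_sext32 _ (by omega), e, UInt64.toNat_ofNat']
  omega

/-- What the pure part of the j-loop body knows before the walk: sites, sizes. -/
theorem prelude {u₀ : State} {g : G} (hent : Entered u₀ g) {pass cs i pcount : Nat} {v : State}
    (c : Common u₀ g v) (hloop : InnerB g pass cs i pcount v) {j : Nat} (hjc : j < g.ch)
    (hnd : v.mem.u8 (g.dnd + j) = 0) :
    g.C ≤ 16 ∧ cs < g.PRD ∧ g.PRD < 2 ^ 21 ∧ g.W < 2 ^ 24 ∧
    Site g.Live' (g.dnd + j) 1 ∧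
    Site g.Live' (g.TB.base + 8 * j) 8 ∧
    Site g.Live' (rowBase g.TB g.C g.PRD j + 8 * cs) 8 ∧
    Site g.Live' (v.mem.ptr (slot g.TB g.C g.PRD j cs) + i) 1 ∧
    Site g.Live' (g.r + 24) 8 ∧
    Site g.Live' (Residue.residue_books v.mem g.r + 16 * v.mem.u8 (v.mem.ptr (slot g.TB g.C g.PRD j cs) + i) + 2 * pass) 2 ∧
    Site g.Live' (g.rb + 8 * j) 8 ∧
    Site g.Live' g.r 4 ∧
    Site g.Live' (g.r + 8) 4 ∧
    Site g.Live' (g.f + 168) 8 ∧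
    v.mem.ptr (g.TB.base + 8 * j) = rowBase g.TB g.C g.PRD j ∧
    v.mem.u8 (v.mem.ptr (slot g.TB g.C g.PRD j cs) + i) < Residue.classifications v.mem g.r ∧
    (g.r + 32 ≤ 0x700000 ∨ 0x800000 ≤ g.r) ∧
    (g.f + 1808 ≤ 0x700000 ∨ 0x800000 ≤ g.f) := by
  have hargs := hent.args
  have hv := c.point.vorbis
  have henv := c.point.env
  have hL := henv.live
  have hres := c.resAt hent
  have hW := c.w_pos hent
  have hcsP : cs < g.PRD := hloop.wi.slot_lt hW
  have hC16 : g.C ≤ 16 := by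
    have h := hent.vorbis.config.header.HD1.2
    unfold G.C
    rw [nchan_def]
    omega
  have hchC : g.ch ≤ g.C := hargs.ch_le
  have hjC : j < g.C := by omega
  have hbusy : ADOBusy g.A' g.others' v.mem g.f g.sz := c.point.busy
  have hTBoff := hbusy.ok.tblock_off c.tblock
  have hTBlive : g.TB.live g.Live' := hbusy.ok.tblock_live_inv c.shadow c.tblock
  have hrows : rowsB g.e.mem g.dnd g.ch j := by
    refine ⟨hjc, ?_⟩
    unfold DND
    rw [← c.dnd_same j hjc, hnd]
    exact fun h => h rfl
  have hrp : RowPtr v.mem g.f g.r (v.mem.ptr (slot g.TB g.C g.PRD j cs)) := hloop.wi.rowptr hW hrows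
  have hiW : i < Residue.W v.mem g.f g.r := by
    rw [c.w_eq]
    exact hloop.i_lt
  have hcl := hrp.class_lt hres hiW
  have hsz : g.TB.size = g.C * (8 + 8 * g.PRD) := c.tb.size
  have hPRD : g.PRD < 2 ^ 21 := by
    have h1 : 1 * (8 + 8 * g.PRD) ≤ g.C * (8 + 8 * g.PRD) := Nat.mul_le_mul_right _ (by omega)
    have e : g.TB.size = g.sz := rfl
    omega
  have hsite4 : Site g.Live' (v.mem.ptr (slot g.TB g.C g.PRD j cs) + i) 1 := hrp.site hL hres hiW rfl
  have hWlt : g.W < 2 ^ 24 := by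
    obtain ⟨q, hq, e⟩ := hrp
    have hB := hres.R8a_row q hq
    have hin := henv.ok.inside _ hB
    rw [c.w_eq] at hin
    simp only [] at hin
    omega
  have hpass := hloop.pass_le
  have hob : g.Blk (objBlock g.f) := hent.vorbis.obj
  have hoffs := hent.pre.free.offStack
  refine ⟨hC16, hcsP, hPRD, hWlt, ?_, ?_, ?_, hsite4, ?_, ?_, ?_, ?_, ?_, ?_, c.tb.rows j hjC, hcl, ?_, ?_⟩
  · exact ((LiveBytes.of_liveIn hargs.dnd_live).site (g.dnd + j) 1 (by omega) (by omega) (by omega)).mono g.live_mono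
  · exact c.tb.site_rowptr hTBlive hjC rfl
  · have := c.tb.site_slot hTBlive hjC hcsP (a := rowBase g.TB g.C g.PRD j + 8 * cs) (by rw [c.tb.rows j hjC])
    exact this
  · exact hv.residue.site_record hL (c.rn_lt hent) 24 8 (by simp only [voff]; omega) (by omega) (by rw [c.config_at])
  · exact hres.site_book hL hcl (by omega) rfl
  · exact ((LiveBytes.of_liveIn hargs.rb_live).site (g.rb + 8 * j) 8 (by omega) (by omega) (by omega)).mono g.live_mono
  · exact hv.residue.site_record hL (c.rn_lt hent) 0 4 (by simp only [voff]; omega) (by omega) (by rw [c.config_at]; rfl)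
  · exact hv.residue.site_record hL (c.rn_lt hent) 8 4 (by simp only [voff]; omega) (by omega) (by rw [c.config_at])
  · exact hv.bits.site_field hL 168 8 (by omega) (by omega) rfl
  · have hB := hv.residue.R2
    have h1 := hoffs _ hB
    have hlt := c.rn_lt hent
    have hR1 := hv.residue.R1
    have e := c.config_at (u₀ := u₀) (g := g) (v := v)
    unfold stb_vorbis.residue_config_at at e
    simp only [voff] at h1 e
    omega
  · have h1 := hoffs _ hob
    simp only [vblock, voff] at h1
    omega

/-- The spans the j-loop body may have written since the loop head: its own stack below the frame (return addresses, the
callee's frame), the spill slot `[rbp-0xd8]`, residue_decode's windows of `*f`, and a window of floats `[a, a+n)`. -/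
def bodySpans (g : G) (a n : Nat) : List Span :=
  [⟨g.RA - 848, g.RA - 248⟩, ⟨g.RA - 224, g.RA - 216⟩, ⟨g.f + 48, g.f + 56⟩, ⟨g.f + 84, g.f + 96⟩, ⟨g.f + 136, g.f + 144⟩,
   ⟨g.f + 1484, g.f + 1749⟩, ⟨g.f + 1752, g.f + 1784⟩, ⟨a, a + n⟩]

/-- **The memory-level part of the loop invariant after the body's stores**: the footprint, the shadow layer, `ADOBusy`, TB, the
i-loop invariant and μ, in a memory that differs from the loop head's inside `bodySpans` only. -/
theorem frame_after {u₀ : State} {g : G} (hent : Entered u₀ g) {pass cs i pcount : Nat} {v : State}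
    (c : Common u₀ g v) (hloop : InnerB g pass cs i pcount v) {m' : Mem} {a n : Nat}
    (hs : Mem.SameExcept (bodySpans g a n) v.mem m')
    (hwin : ∃ k : Nat, (k : Int) < stb_vorbis.channels g.e.mem g.f ∧ stb_vorbis.channel_buffers g.e.mem g.f k ≤ a ∧
      a + n ≤ stb_vorbis.channel_buffers g.e.mem g.f k + 4 * bsize g.e.mem g.f 1)
    (hun : ShadowUntouched v.mem m')
    (hmu : mu m' g.f ≤ mu v.mem g.f) :
    Mem.SameExcept (g.spec.footprint g.e) g.e.mem m' ∧
    ShadowInv g.others' g.frames' (g.RA - 248) m' ∧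
    ADOBusy g.A' g.others' m' g.f g.sz ∧
    TempRows m' g.TB g.C g.PRD ∧
    mu m' g.f ≤ mu g.e.mem g.f ∧
    WInnerInv m' g.f g.r g.TB g.C g.PRD g.W g.rowsB pass cs i pcount := by
  obtain ⟨k, hk, hka, hkb⟩ := hwin
  have hroom := hent.room
  have hpre := hent.pre
  have hok := hpre.env.ok
  have hob : g.Blk (objBlock g.f) := hent.vorbis.obj
  have hobst := hpre.free.offStack _ hob
  have hobgap := hpre.free.offGap _ hob
  have hobin := hok.inside _ hob
  simp only [vblock, voff] at hobst hobgap hobin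
  have hcfg := hent.vorbis.config
  have hC : SampleBuf g.Blk g.e.mem g.f ⟨stb_vorbis.channel_buffers g.e.mem g.f k, 4 * bsize g.e.mem g.f 1⟩ :=
    SampleBuf.chan k hk
  have hCblk := SampleBuf.blk hcfg hC
  have hCst := hpre.free.offStack _ hCblk
  have hCgap := hpre.free.offGap _ hCblk
  have hCobj := hent.sep.bufobj _ hC
  simp only [vblock, voff] at hCst hCgap hCobj
  have hbusy : ADOBusy g.A' g.others' v.mem g.f g.sz := c.point.busy
  have hTBr := hbusy.ok.tblock_range c.tblock
  have hTBoff := hbusy.ok.tblock_off c.tblock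
  have hAR2 := hent.ado.ok.AR2
  have hAR2' := hbusy.ok.AR2
  have eB : g.A'.B = g.A.B := rfl
  have eL : g.A'.L = g.A.L := rfl
  have eS : g.A'.S = g.A.S := rfl
  have hr8 := le_r8 g.TB.size
  have eRA : (g.e.reg .rsp).toNat = g.RA := rfl
  have ef : (g.e.reg .rdi).toNat = g.f := rfl
  -- 1. the footprint
  have hsame' : Mem.SameExcept (g.spec.footprint g.e) g.e.mem m' := by
    apply c.same.step_same hs
    intro w hw x h1 h2
    unfold bodySpans at hw
    simp only [List.mem_cons, List.mem_nil_iff, or_false] at hw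
    unfold Spec.footprint
    rcases hw with rfl | rfl | rfl | rfl | rfl | rfl | rfl | rfl
    · exact ⟨_, List.mem_cons_self, by simp only [vspec, eRA] at *; omega, by simp only [vspec, eRA] at *; omega⟩
    · exact ⟨_, List.mem_cons_self, by simp only [vspec, eRA] at *; omega, by simp only [vspec, eRA] at *; omega⟩
    · refine ⟨⟨g.f + 48, g.f + 56⟩, ?_, h1, h2⟩
      simp only [vspec, DecodeResidue.writes, ef, List.mem_cons, List.mem_append, true_or, or_true]
    · refine ⟨⟨g.f + 84, g.f + 96⟩, ?_, h1, h2⟩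
      simp only [vspec, DecodeResidue.writes, ef, List.mem_cons, List.mem_append, true_or, or_true]
    · refine ⟨⟨g.f + 132, g.f + 144⟩, ?_, by simp only [] at *; omega, h2⟩
      simp only [vspec, DecodeResidue.writes, ef, List.mem_cons, List.mem_append, true_or, or_true]
    · refine ⟨⟨g.f + 1484, g.f + 1749⟩, ?_, h1, h2⟩
      simp only [vspec, DecodeResidue.writes, ef, List.mem_cons, List.mem_append, true_or, or_true]
    · refine ⟨⟨g.f + 1752, g.f + 1784⟩, ?_, h1, h2⟩
      simp only [vspec, DecodeResidue.writes, ef, List.mem_cons, List.mem_append, true_or, or_true]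
    · refine ⟨⟨stb_vorbis.channel_buffers g.e.mem g.f k, stb_vorbis.channel_buffers g.e.mem g.f k + 4 * bsize g.e.mem g.f 1⟩,
        ?_, by simp only [] at *; omega, by simp only [] at *; omega⟩
      apply List.mem_cons_of_mem
      simp only [vspec, DecodeResidue.writes, ef]
      apply List.mem_append_right
      apply List.mem_map.mpr
      refine ⟨k, List.mem_range.mpr ?_, rfl⟩
      rw [nchan_def]
      have := hcfg.header.HD1
      omega
  -- 2. the spans stay away from the temp block, and are legal decode-time stores
  have hTBd : ∀ w, w ∈ bodySpans g a n → g.TB.base + g.TB.size ≤ w.lo ∨ w.hi ≤ g.TB.base := by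
    intro w hw
    unfold bodySpans at hw
    simp only [List.mem_cons, List.mem_nil_iff, or_false] at hw
    have eTB : g.TB.base = g.A'.B + g.A'.T := rfl
    rcases hw with rfl | rfl | rfl | rfl | rfl | rfl | rfl | rfl <;> simp only [] <;> omega
  have hTBk : g.TB.Kept v.mem m' := Block.Kept.of_sameExcept hs hTBd (by omega)
  obtain ⟨ech, eb, eptr⟩ := ConfigOK.buffers_eq (c.obj.sub ConfigOK.wins_decode) hcfg.header.HD1.2
  have hCv : SampleBuf g.Blk v.mem g.f ⟨stb_vorbis.channel_buffers g.e.mem g.f k, 4 * bsize g.e.mem g.f 1⟩ := by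
    rw [← (eptr k hk).1, ← eb]
    exact SampleBuf.chan k (by rw [ech]; exact hk)
  have hst : ∀ w, w ∈ bodySpans g a n → StoreOK g.Blk v.mem g.f w := by
    intro w hw
    unfold bodySpans at hw
    simp only [List.mem_cons, List.mem_nil_iff, or_false] at hw
    rcases hw with rfl | rfl | rfl | rfl | rfl | rfl | rfl | rfl
    · apply StoreOK.off
      intro B hB
      have := hpre.free.offStack B hB
      simp only []
      omega
    · apply StoreOK.off
      intro B hB
      have := hpre.free.offStack B hB
      simp only []
      omega
    · apply StoreOK.hole
      unfold InHole
      simp only []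
      omega
    · apply StoreOK.hole
      unfold InHole
      simp only []
      omega
    · apply StoreOK.hole
      unfold InHole
      simp only []
      omega
    · apply StoreOK.hole
      unfold InHole
      simp only []
      omega
    · apply StoreOK.hole
      unfold InHole
      simp only []
      omega
    · exact StoreOK.buffer _ hCv hka hkb
  have hvcfg : ConfigOK g.Blk v.mem g.f := (show Real.VorbisOK g.len g.Blk v.mem g.f from c.point.vorbis).config
  have hkept := StoreOK.reads_kept hvcfg hok c.sep hs hst
  -- 3. what the record reads, and the `classdata` table
  obtain ⟨hrd', _, _⟩ := hent.reads hsame'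
  have hrd0 := c.reads
  have hrd : ResidueReads v.mem g.f m' g.f g.r :=
    ⟨hrd'.begin.trans hrd0.begin.symm, hrd'.end_.trans hrd0.end_.symm, hrd'.part_size.trans hrd0.part_size.symm,
      hrd'.classifications.trans hrd0.classifications.symm, hrd'.classbook.trans hrd0.classbook.symm,
      hrd'.classdata.trans hrd0.classdata.symm, hrd'.residue_books.trans hrd0.residue_books.symm,
      hrd'.codebook_count.trans hrd0.codebook_count.symm, hrd'.cbk.trans hrd0.cbk.symm, hrd'.E.trans hrd0.E.symm,
      hrd'.W.trans hrd0.W.symm⟩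
  have hcd : (Block.mk (Residue.classdata v.mem g.r) (8 * Residue.E v.mem g.f g.r)).Kept v.mem m' := by
    apply hkept
    apply ConfigOK.Reads.residue
    have h := ResidueOK.Owns.record (mem := v.mem) (f := g.f) g.rn (c.rn_lt hent) _
      (ResidueAtOK.Owns.classdata (mem := v.mem) (f := g.f) (r := stb_vorbis.residue_config_at v.mem g.f g.rn))
    rw [c.config_at] at h
    exact h
  -- 4. the pieces
  have hW := c.w_pos hent
  have hchC : g.ch ≤ g.C := hent.args.ch_le
  refine ⟨hsame', c.shadow.untouched hun, ?_, ?_, Nat.le_trans hmu c.mu_le, ?_⟩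
  · apply hbusy.transfer
    apply ObjEq.of_sameExcept hs
    · intro w hw
      simp only [ADO.wins, List.mem_cons, List.mem_nil_iff, or_false] at hw
      rcases hw with rfl | rfl <;> simp only [] <;> omega
    · intro w hw sp hsp
      simp only [ADO.wins, List.mem_cons, List.mem_nil_iff, or_false] at hw
      unfold bodySpans at hsp
      simp only [List.mem_cons, List.mem_nil_iff, or_false] at hsp
      rcases hw with rfl | rfl <;> rcases hsp with rfl | rfl | rfl | rfl | rfl | rfl | rfl | rfl <;> simp only [] <;> omega
  · apply c.tb.frame
    have hsz := c.tb.size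
    have h3 : g.C * (8 + 8 * g.PRD) = g.C * 8 + g.C * (8 * g.PRD) := Nat.mul_add _ _ _
    apply Block.Kept.of_sameExcept hs
    · intro w hw
      have := hTBd w hw
      simp only []
      omega
    · simp only []
      omega
  · apply hloop.wi.frame (fun j h => h) ?_ hW
    intro j m hj hfill hm
    exact hfill.frame (by have := hj.1; omega) hm c.tb.size hTBk hrd hcd

/-- COMMON at a state with the same memory, frame pointer and stack pointer (the body wrote registers only). -/
theorem common_same_mem {u₀ : State} {g : G} {v s : State} (c : Common u₀ g v) (hm : s.mem = v.mem)
    (hbp : s.reg .rbp = v.reg .rbp) (hsp : s.reg .rsp = v.reg .rsp) (hinv : abiInv s) : Common u₀ g s := by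
  obtain ⟨f1, f2, f3, _, f5, f6, f7, f8, f9, f10, f11, f12, f13, f14, f15, f16, f17, f18, f19, f20, f21, f22, f23, f24, f25,
    f26, f27, f28⟩ := c
  refine ⟨hbp.trans f1, hsp.trans f2, ?_, hinv, ?_, ?_, ?_, ?_, ?_, ?_, ?_, ?_, ?_, ?_, ?_, ?_, ?_, ?_, ?_, ?_, ?_, ?_, ?_, ?_,
    ?_, ?_, ?_, ?_⟩
  all_goals rw [hm]
  all_goals with_reducible assumption

/-- The i-loop's assertion at a state with the same memory and r15. -/
theorem innerB_same_mem {g : G} {pass cs i pcount : Nat} {v s : State} (h : InnerB g pass cs i pcount v) (hm : s.mem = v.mem)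
    (h15 : s.reg .r15 = v.reg .r15) : InnerB g pass cs i pcount s := by
  obtain ⟨⟨p1, p2, p3, p4⟩, f2, f3, f4, f5, f6, f7, f8, f9⟩ := h
  refine ⟨⟨p1, ?_, ?_, ?_⟩, f2, h15.trans f3, ?_, ?_, ?_, f7, f8, ?_⟩
  all_goals rw [hm]
  all_goals with_reducible assumption

/-- **Segment 10 from its loop body**: the j-loop 2279 is `ReachVia.loop` with the invariant `At30` (its `∃ j` is the loop
counter in ebx) and the measure `ch − j`. -/
theorem seg10_of_body {Lay : Layout} {μ : Microarch} {u₀ : State}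
    (hbody : ∀ g : G, Entered u₀ g → ∀ pass cs i pcount v, At30 u₀ g pass cs i pcount v →
      ReachVia Lay μ WayInv v (fun v' => (At34 u₀ g pass cs i pcount v' ∨ At32 u₀ g v') ∨
        (At30 u₀ g pass cs i pcount v' ∧ g.ch - (v'.reg .rbx).toNat < g.ch - (v.reg .rbx).toNat))) :
    Seg10 Lay μ u₀ := by
  intro g hent pass cs i pcount v hat
  exact ReachVia.loop (Inv := fun v => At30 u₀ g pass cs i pcount v)
    (Post := fun v' => At34 u₀ g pass cs i pcount v' ∨ At32 u₀ g v') (fun v => g.ch - (v.reg .rbx).toNat)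
    (fun v hv => hbody g hent pass cs i pcount v hv) v hat

/-- The `jge` at 0x10f91c not taken means `j < ch` (both are small). -/
theorem lt_of_not_jge (ch j : Nat) (hch : ch ≤ 16) (hj : j ≤ ch)
    (h : ¬(BitVec.ofNat 32 ch).toInt ≤ (Word.part Width.w32 (UInt64.ofNat j)).toInt) : j < ch := by
  have e1 : (BitVec.ofNat 32 ch).toNat = ch := Vorbis.Spec.toNat_ofNat32 ch (by omega)
  have e2 : (Word.part Width.w32 (UInt64.ofNat j)).toNat = j := by
    rw [Vorbis.toNat_part32, UInt64.toNat_ofNat']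
    omega
  rw [Vorbis.Spec.toInt_of_lt _ (by omega), Vorbis.Spec.toInt_of_lt _ (by omega), e1, e2] at h
  omega

/-- **The head of the j-loop 2279** (0x10f914 – 0x10f91c: `mov eax,[rbp-0x94] ; cmp ebx,eax ; jge`): to the latch of the i-loop
(`At34`: `j ≥ ch`), or to 0x10f922 with `j < ch`, the memory and every register but rax unchanged. -/
theorem body_head {Lay : Layout} (hLay : Lay.hi = 0x1000000) {μ : Microarch} (hμ : UserX.MicroOK μ) {u₀ : State}
    (hcode : HasCodeNat Lay u₀ Vorbis.L.decode_residue.entry Vorbis.Code.code_decode_residue.nat Vorbis.L.decode_residue.size)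
    (g : G) (hent : Entered u₀ g) (pass cs i pcount : Nat) (v : State) (hat : At30 u₀ g pass cs i pcount v) :
    ReachVia Lay μ WayInv v (fun v' => At34 u₀ g pass cs i pcount v' ∨
      (v'.rip = 0x10f922 ∧ v'.mem = v.mem ∧ RegsKept [.rax] v v' ∧ abiInv v' ∧
        ∃ j, j < g.ch ∧ v.reg .rbx = UInt64.ofNat j)) := by
  have he := hent.entry
  v_entry he
  obtain ⟨hrip, c, hloop, j, hj, hrbx⟩ := hat
  have r_rsp := c.rsp
  have r_rbp := c.rbp
  have r_r15 := hloop.r15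
  have w_eq : Mem.EqOn Vorbis.L.textLo Vorbis.L.textHi u₀.mem v.mem := c.code
  have hdf : v.flags .df = false := (show abiInv _ from c.inv).1
  have hmx : v.mxcsr &&& 0x1F80 = 0x1F80 := (show abiInv _ from c.inv).2
  have hsse := Vorbis.sseOK_of_abiInv c.inv
  have l_ch := c.fr_ch
  have hC16 : g.C ≤ 16 := by
    have h := hent.vorbis.config.header.HD1.2
    unfold G.C
    rw [nchan_def]
    omega
  have hchC : g.ch ≤ g.C := hent.args.ch_le
  u_walk hcode [hμ.vendor] until [Vorbis.L.decode_residue.cut34, 0x10f922] span [Vorbis.L.textLo, Vorbis.L.textHi] side (v_side)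
  · -- 0x10fa8d: j ≥ ch, the latch of the i-loop
    refine ReachVia.done (Or.inl ⟨w_rip, ?_, ?_⟩)
    · refine common_same_mem c w_mem (w_kept .rbp rfl) (w_kept .rsp rfl) ?_
      v_inv
    · exact innerB_same_mem hloop w_mem (w_kept .r15 rfl)
  · -- 0x10f922: j < ch
    refine ReachVia.done (Or.inr ⟨w_rip, w_mem, w_kept, ?_, j, lt_of_not_jge g.ch j (by omega) hj hbr_10f91c, rfl⟩)
    v_inv

/-- **residue_decode's precondition at the call 0x10fa3f**: the state `s` at the callee's entry differs from the loop head `v`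
by stores into the own stack only; rdi = f, rsi = the residue book `codebooks + 2120·b` with `b = residue_books[c][pass] ≥ 0`,
rdx = `residue_buffers[j]` of a decoded channel, ecx = `begin + pcount·part_size`, r8d = `part_size`. -/
theorem call_pre {u₀ : State} {g : G} (hent : Entered u₀ g) {v s : State} (c : Common u₀ g v)
    (hs : Mem.SameExcept [⟨g.RA - 848, g.RA⟩] v.mem s.mem)
    (hun : ShadowUntouched v.mem s.mem)
    (hrsp : (s.reg .rsp).toNat + 8 = g.RA - 248)
    (hrdi : (s.reg .rdi).toNat = g.f)
    {cv pass j pc : Nat} (hcl : cv < Residue.classifications v.mem g.r) (hpass : pass < 8)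
    (hb : 0 ≤ Residue.book v.mem g.r cv pass)
    (hrsi : (s.reg .rsi).toNat = stb_vorbis.codebooks_at v.mem g.f (Residue.book v.mem g.r cv pass).toNat)
    (hjc : j < g.ch) (hnd : v.mem.u8 (g.dnd + j) = 0)
    (hrdx : (s.reg .rdx).toNat = v.mem.ptr (g.rb + 8 * j))
    (hpc : pc < g.PRD)
    (hrcx : argU32 (s.reg .rcx) = Residue.begin v.mem g.r + pc * Residue.part_size v.mem g.r)
    (hr8 : argU32 (s.reg .r8) = Residue.part_size v.mem g.r) :
    (residue_decode.spec g.others' g.frames' g.Blk g.len).pre s := by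
  have hroom := hent.room
  have hpre := hent.pre
  have hok := hpre.env.ok
  have hob : g.Blk (objBlock g.f) := hent.vorbis.obj
  have hobst := hpre.free.offStack _ hob
  have hobin := hok.inside _ hob
  simp only [vblock, voff] at hobst hobin
  have eRA : (g.e.reg .rsp).toNat = g.RA := rfl
  have ef : (g.e.reg .rdi).toNat = g.f := rfl
  have hres := c.resAt hent
  -- the memory of `s`: inside the footprint, `*f` untouched
  have hsame : Mem.SameExcept (g.spec.footprint g.e) g.e.mem s.mem := by
    apply c.same.step_same hs
    intro w hw x h1 h2
    rw [List.mem_singleton.mp hw] at h1 h2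
    unfold Spec.footprint
    exact ⟨_, List.mem_cons_self, by simp only [vspec, eRA] at *; omega, by simp only [vspec, eRA] at *; omega⟩
  have hobj : (objBlock g.f).Same v.mem s.mem := by
    show Mem.EqOn g.f (g.f + Off.sizeof.stb_vorbis) v.mem s.mem
    apply hs.eqOn
    intro w hw
    rw [List.mem_singleton.mp hw]
    simp only [voff]
    omega
  have hvv : Real.VorbisOK g.len g.Blk v.mem g.f := c.point.vorbis
  have hbits : Bits g.Blk g.len s.mem g.f := hvv.bits.frame_fields (Bits.SameFields.of_same hobj)
  obtain ⟨hvs, hseps, hds⟩ := hent.frame hsame hbits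
  have hcfg := hvs.config
  -- the shadow clause
  have hsh : ShadowPre g.others' g.frames' s := by
    refine ⟨?_, hent.offText'⟩
    rw [hrsp]
    exact c.shadow.untouched hun
  -- the book
  have ecb : stb_vorbis.codebooks s.mem g.f = stb_vorbis.codebooks v.mem g.f := by
    simp only [vacc, voff]
    rw [hds.u64 168 (by decide), c.obj.u64 168 (by decide)]
  have ecc : stb_vorbis.codebook_count s.mem g.f = stb_vorbis.codebook_count v.mem g.f := by
    simp only [vacc, voff]
    rw [hds.i32 160 (by decide), c.obj.i32 160 (by decide)]
  have hblt := hres.book_lt hcl hpass hb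
  obtain ⟨bi, hbi⟩ : ∃ bi : Nat, (Residue.book v.mem g.r cv pass).toNat = bi := ⟨_, rfl⟩
  have hbi' : (bi : Int) < stb_vorbis.codebook_count s.mem g.f := by
    rw [ecc]
    omega
  have hrsi' : (s.reg .rsi).toNat = stb_vorbis.codebooks_at s.mem g.f bi := by
    rw [hrsi, hbi]
    unfold stb_vorbis.codebooks_at
    rw [ecb]
  have hbook : BookPre g.others' g.frames' g.Blk g.len s := by
    refine ⟨⟨hsh, ?_, ?_⟩, hok, ?_, ?_, ?_⟩
    · rw [hrdi]
      exact hent.reader'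
    · rw [hrdi]
      exact hbits
    · rw [hrsi']
      refine ⟨_, hcfg.cb0.F2, ?_⟩
      have hcnt := hcfg.cb0.F1
      have hi' : bi < (stb_vorbis.codebook_count s.mem g.f).toNat := by omega
      constructor
      · show stb_vorbis.codebooks s.mem g.f ≤ stb_vorbis.codebooks_at s.mem g.f bi
        unfold stb_vorbis.codebooks_at
        omega
      · show stb_vorbis.codebooks_at s.mem g.f bi + Off.sizeof.Codebook ≤
          stb_vorbis.codebooks s.mem g.f + Off.sizeof.Codebook * (stb_vorbis.codebook_count s.mem g.f).toNat
        unfold stb_vorbis.codebooks_at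
        simp only [voff]
        omega
    · rw [hrsi']
      exact hcfg.books bi hbi'
    · rw [hrdi, hrsi']
      exact hent.bookApart hsame bi hbi'
  -- fact K and the sizes
  have hargs := hent.args
  have hK := Residue.factK_buffer hres (rtype := g.rtype) (pc := pc) hargs.n_le (by rw [c.prd]; exact hpc)
  have hR5 := hres.R5
  have hb1 : bsize g.e.mem g.f 1 ≤ 8192 := by
    have h := hent.vorbis.config.header.HD3.range
    rw [bsize_one]
    omega
  -- the channel buffer
  have hnd' : ¬ DND g.e.mem g.dnd j := by
    unfold DND
    rw [← c.dnd_same j hjc, hnd]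
    exact fun h => h rfl
  obtain ⟨k, hk, hptr, hlive⟩ := hargs.buf j hjc hnd'
  have etgt : v.mem.ptr (g.rb + 8 * j) = stb_vorbis.channel_buffers g.e.mem g.f k := by
    rw [c.rb_same j hjc, hptr]
  rw [hptr] at hlive
  have hC : SampleBuf g.Blk g.e.mem g.f ⟨stb_vorbis.channel_buffers g.e.mem g.f k, 4 * bsize g.e.mem g.f 1⟩ :=
    SampleBuf.chan k hk
  have hCobj := hent.sep.bufobj _ hC
  have hCcb := hent.sep.buf _ ConfigOK.Reads.codebooks _ hC
  obtain ⟨ech, eb, eptr⟩ := ConfigOK.buffers_eq (hds.sub ConfigOK.wins_decode) hent.vorbis.config.header.HD1.2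
  have hCs : SampleBuf g.Blk s.mem g.f ⟨stb_vorbis.channel_buffers g.e.mem g.f k, 4 * bsize g.e.mem g.f 1⟩ := by
    rw [← (eptr k hk).1, ← eb]
    exact SampleBuf.chan k (by rw [ech]; exact hk)
  have ecbe : stb_vorbis.codebooks v.mem g.f = stb_vorbis.codebooks g.e.mem g.f := by
    simp only [vacc, voff]
    rw [c.obj.u64 168 (by decide)]
  have ecce : stb_vorbis.codebook_count v.mem g.f = stb_vorbis.codebook_count g.e.mem g.f := by
    simp only [vacc, voff]
    rw [c.obj.i32 160 (by decide)]
  refine ⟨hbook, ?_, ?_, ?_⟩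
  · rw [hrcx, hr8]
    omega
  · rw [hr8]
    omega
  · rw [hrdi, hrsi, hrdx, hrcx, hr8, etgt]
    generalize hoff : Residue.begin v.mem g.r + pc * Residue.part_size v.mem g.r = off at *
    refine ⟨?_, ?_, ?_, ?_⟩
    · exact ((LiveBytes.of_liveIn hlive).site _ _ (by omega) (by omega) (by omega)).mono g.live_mono
    · simp only [vblock, voff] at hCobj ⊢
      omega
    · rw [hbi]
      unfold stb_vorbis.codebooks_at
      rw [ecbe]
      rw [ecce] at hblt
      simp only [vblock, voff] at hCcb ⊢
      omega
    · intro hse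
      have e1 : stb_vorbis.codebooks_at v.mem g.f (Residue.book v.mem g.r cv pass).toNat = stb_vorbis.codebooks_at s.mem g.f bi := by
        rw [hbi]
        unfold stb_vorbis.codebooks_at
        rw [ecb]
      rw [e1] at hse ⊢
      have hd := hseps.buf _ (ConfigOK.Reads.sorted_values bi hbi' hse) _ hCs
      simp only [vblock] at hd ⊢
      omega

/-- A slot of the frame `[RA-248, RA-224) ∪ [RA-216, RA+8)` reads the same after the body's stores. -/
theorem slot_keep {u₀ : State} {g : G} (hent : Entered u₀ g) {v : State} {m' : Mem} {a n : Nat}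
    (hs : Mem.SameExcept (bodySpans g a n) v.mem m')
    (hwin : ∃ k : Nat, (k : Int) < stb_vorbis.channels g.e.mem g.f ∧ stb_vorbis.channel_buffers g.e.mem g.f k ≤ a ∧
      a + n ≤ stb_vorbis.channel_buffers g.e.mem g.f k + 4 * bsize g.e.mem g.f 1)
    (off k : Nat) (hin : (216 < off ∧ off ≤ 248 ∧ 224 + k ≤ off) ∨ (k ≤ off ∧ off ≤ 216)) :
    m'.readLE (g.e.reg .rsp - UInt64.ofNat off) k = v.mem.readLE (g.e.reg .rsp - UInt64.ofNat off) k := by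
  obtain ⟨kk, hk, hka, hkb⟩ := hwin
  have hroom := hent.room
  have hpre := hent.pre
  have hob : g.Blk (objBlock g.f) := hent.vorbis.obj
  have hobst := hpre.free.offStack _ hob
  simp only [vblock, voff] at hobst
  have hC : SampleBuf g.Blk g.e.mem g.f ⟨stb_vorbis.channel_buffers g.e.mem g.f kk, 4 * bsize g.e.mem g.f 1⟩ :=
    SampleBuf.chan kk hk
  have hCst := hpre.free.offStack _ (SampleBuf.blk hent.vorbis.config hC)
  simp only [] at hCst
  have eRA : (g.e.reg .rsp).toNat = g.RA := rfl
  have ea : (g.e.reg .rsp - UInt64.ofNat off).toNat = g.RA - off := by u_omega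
  apply hs.readLE
  · rw [ea]
    omega
  · intro w hw
    unfold bodySpans at hw
    simp only [List.mem_cons, List.mem_nil_iff, or_false] at hw
    rw [ea]
    rcases hw with rfl | rfl | rfl | rfl | rfl | rfl | rfl | rfl <;> simp only [] <;> omega

/-- **The assertions of the loop head again, after the body's stores**: COMMON and the i-loop's bundle at a state whose memory
differs from the loop head's inside `bodySpans` only, with the frame registers as at the head. -/
theorem exit_all {u₀ : State} {g : G} (hent : Entered u₀ g) {pass cs i pcount : Nat} {v s : State}
    (c : Common u₀ g v) (hloop : InnerB g pass cs i pcount v) {a n : Nat}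
    (hs : Mem.SameExcept (bodySpans g a n) v.mem s.mem)
    (hwin : ∃ k : Nat, (k : Int) < stb_vorbis.channels g.e.mem g.f ∧ stb_vorbis.channel_buffers g.e.mem g.f k ≤ a ∧
      a + n ≤ stb_vorbis.channel_buffers g.e.mem g.f k + 4 * bsize g.e.mem g.f 1)
    (hun : ShadowUntouched v.mem s.mem)
    (hbits : Bits g.Blk g.len s.mem g.f) (hmu : mu s.mem g.f ≤ mu v.mem g.f)
    (hbp : s.reg .rbp = g.e.reg .rsp - 8) (hsp : s.reg .rsp = g.e.reg .rsp - 248) (h15 : s.reg .r15 = UInt64.ofNat g.r)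
    (hcode : CodeOK u₀ s.mem) (hinv : abiInv s) :
    Common u₀ g s ∧ InnerB g pass cs i pcount s := by
  obtain ⟨hsame', hshadow', hbusy', htb', hmu', hwi'⟩ := frame_after hent c hloop hs hwin hun hmu
  have k8 : ∀ off : Nat, off ≤ 216 → 8 ≤ off → s.mem.readLE (g.e.reg .rsp - UInt64.ofNat off) 8 =
      v.mem.readLE (g.e.reg .rsp - UInt64.ofNat off) 8 :=
    fun off h1 h2 => slot_keep hent hs hwin off 8 (Or.inr ⟨h2, h1⟩)
  have k4 : ∀ off : Nat, off ≤ 216 → 4 ≤ off → s.mem.readLE (g.e.reg .rsp - UInt64.ofNat off) 4 =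
      v.mem.readLE (g.e.reg .rsp - UInt64.ofNat off) 4 :=
    fun off h1 h2 => slot_keep hent hs hwin off 4 (Or.inr ⟨h2, h1⟩)
  constructor
  · exact Common.of_frame hent hbp hsp hcode hinv
      ((congrArg UInt64.ofNat (k8 8 (by omega) (by omega))).trans c.s_rbp)
      ((congrArg UInt64.ofNat (k8 16 (by omega) (by omega))).trans c.s_r15)
      ((congrArg UInt64.ofNat (k8 24 (by omega) (by omega))).trans c.s_r14)
      ((congrArg UInt64.ofNat (k8 32 (by omega) (by omega))).trans c.s_r13)
      ((congrArg UInt64.ofNat (k8 40 (by omega) (by omega))).trans c.s_r12)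
      ((congrArg UInt64.ofNat (k8 48 (by omega) (by omega))).trans c.s_rbx)
      ((congrArg UInt64.ofNat (k8 184 (by omega) (by omega))).trans c.fr_f)
      ((congrArg UInt64.ofNat (k8 216 (by omega) (by omega))).trans c.fr_rb)
      ((k4 156 (by omega) (by omega)).trans c.fr_ch)
      ((k4 196 (by omega) (by omega)).trans c.fr_prd)
      ((k4 200 (by omega) (by omega)).trans c.fr_w)
      ((slot_keep hent hs hwin 232 4 (Or.inl ⟨by omega, by omega, by omega⟩)).trans c.fr_rtype)
      ((k8 176 (by omega) (by omega)).trans c.fr_pcd)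
      ((slot_keep hent hs hwin 240 8 (Or.inl ⟨by omega, by omega, by omega⟩)).trans c.fr_si)
      hsame' hshadow' hbits hbusy' htb' hmu'
  · obtain ⟨⟨p1, p2, p3, p4⟩, f2, _, f4, f5, f6, f7, f8, _⟩ := hloop
    exact ⟨⟨p1, (congrArg UInt64.ofNat (k8 168 (by omega) (by omega))).trans p2,
        (k4 160 (by omega) (by omega)).trans p3,
        (slot_keep hent hs hwin 244 4 (Or.inl ⟨by omega, by omega, by omega⟩)).trans p4⟩,
      f2, h15, (k4 192 (by omega) (by omega)).trans f4,
      (slot_keep hent hs hwin 228 4 (Or.inl ⟨by omega, by omega, by omega⟩)).trans f5,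
      (k4 208 (by omega) (by omega)).trans f6, f7, f8, hwi'⟩

/-- **Stores into the own stack only** (return addresses of the check calls, the spill slot): inside `bodySpans` whatever the
window of floats is; `Bits f` and μ are kept. -/
theorem stack_only {u₀ : State} {g : G} (hent : Entered u₀ g) {v : State} (c : Common u₀ g v) {m' : Mem}
    (hs0 : Mem.SameExcept [⟨g.RA - 848, g.RA - 248⟩, ⟨g.RA - 224, g.RA - 216⟩] v.mem m') (a n : Nat) :
    Mem.SameExcept (bodySpans g a n) v.mem m' ∧ Bits g.Blk g.len m' g.f ∧ mu m' g.f ≤ mu v.mem g.f ∧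
      Mem.SameExcept [⟨g.RA - 848, g.RA⟩] v.mem m' := by
  have hroom := hent.room
  have hob : g.Blk (objBlock g.f) := hent.vorbis.obj
  have hobst := hent.pre.free.offStack _ hob
  have hobin := hent.pre.env.ok.inside _ hob
  simp only [vblock, voff] at hobst hobin
  have hobj : (objBlock g.f).Same v.mem m' := by
    show Mem.EqOn g.f (g.f + Off.sizeof.stb_vorbis) v.mem m'
    apply hs0.eqOn
    intro w hw
    simp only [List.mem_cons, List.mem_nil_iff, or_false] at hw
    rcases hw with rfl | rfl <;> simp only [voff] <;> omega
  have hvv : Real.VorbisOK g.len g.Blk v.mem g.f := c.point.vorbis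
  refine ⟨?_, hvv.bits.frame_fields (Bits.SameFields.of_same hobj), Nat.le_of_eq (mu_frame_obj (by omega) hobj), ?_⟩
  · apply hs0.mono
    intro w hw x h1 h2
    simp only [List.mem_cons, List.mem_nil_iff, or_false] at hw
    unfold bodySpans
    rcases hw with rfl | rfl
    · exact ⟨_, List.mem_cons_self, h1, h2⟩
    · exact ⟨_, List.mem_cons_of_mem _ List.mem_cons_self, h1, h2⟩
  · apply hs0.mono
    intro w hw x h1 h2
    simp only [List.mem_cons, List.mem_nil_iff, or_false] at hw
    refine ⟨_, List.mem_singleton.mpr rfl, ?_, ?_⟩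
    · rcases hw with rfl | rfl <;> simp only [] at * <;> omega
    · rcases hw with rfl | rfl <;> simp only [] at * <;> omega

/-- Channel 0 exists: the dummy window of floats of the exits without a call. -/
theorem win0 {u₀ : State} {g : G} (hent : Entered u₀ g) :
    ∃ k : Nat, (k : Int) < stb_vorbis.channels g.e.mem g.f ∧
      stb_vorbis.channel_buffers g.e.mem g.f k ≤ stb_vorbis.channel_buffers g.e.mem g.f 0 ∧
      stb_vorbis.channel_buffers g.e.mem g.f 0 + 0 ≤ stb_vorbis.channel_buffers g.e.mem g.f k + 4 * bsize g.e.mem g.f 1 := by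
  have h := hent.vorbis.config.header.HD1.1
  exact ⟨0, by omega, Nat.le_refl _, by omega⟩

/-- `add ebx, 1` on a small counter. -/
theorem inc_ebx (j : Nat) (h : j < 2 ^ 31) :
    Word.ofBV (Word.part Width.w32 (UInt64.ofNat j) + 1#32) = UInt64.ofNat (j + 1) := by
  apply UInt64.toNat_inj.mp
  have e : (Word.part Width.w32 (UInt64.ofNat j)).toNat = j := by
    rw [Vorbis.toNat_part32, UInt64.toNat_ofNat']
    omega
  rw [Vorbis.toNat_ofBV32, BitVec.toNat_add, e, UInt64.toNat_ofNat']
  simp only [BitVec.toNat_ofNat]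
  omega

/-- **The latch `add ebx,1` reached**: the loop head's assertion with `j + 1`, and the measure `ch − j` has decreased. -/
theorem latch_exit {u₀ : State} {g : G} (hent : Entered u₀ g) {pass cs i pcount : Nat} {v s : State}
    (c : Common u₀ g v) (hloop : InnerB g pass cs i pcount v) {j : Nat} (hjc : j < g.ch) {a n : Nat}
    (hs : Mem.SameExcept (bodySpans g a n) v.mem s.mem)
    (hwin : ∃ k : Nat, (k : Int) < stb_vorbis.channels g.e.mem g.f ∧ stb_vorbis.channel_buffers g.e.mem g.f k ≤ a ∧
      a + n ≤ stb_vorbis.channel_buffers g.e.mem g.f k + 4 * bsize g.e.mem g.f 1)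
    (hun : ShadowUntouched v.mem s.mem)
    (hbits : Bits g.Blk g.len s.mem g.f) (hmu : mu s.mem g.f ≤ mu v.mem g.f)
    (hrip : s.rip = L.decode_residue.cut30)
    (hbp : s.reg .rbp = g.e.reg .rsp - 8) (hsp : s.reg .rsp = g.e.reg .rsp - 248) (h15 : s.reg .r15 = UInt64.ofNat g.r)
    (hcode : CodeOK u₀ s.mem) (hinv : abiInv s)
    (hbx : s.reg .rbx = Word.ofBV (Word.part Width.w32 (UInt64.ofNat j) + 1#32)) :
    At30 u₀ g pass cs i pcount s ∧ g.ch - (s.reg .rbx).toNat < g.ch - (UInt64.ofNat j).toNat := by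
  obtain ⟨hc, hi⟩ := exit_all hent c hloop hs hwin hun hbits hmu hbp hsp h15 hcode hinv
  have hC16 : g.ch ≤ 16 := by
    have h := hent.vorbis.config.header.HD1.2
    have h2 : g.ch ≤ g.C := hent.args.ch_le
    unfold G.C at h2
    rw [nchan_def] at h2
    omega
  have e := inc_ebx j (by omega)
  rw [e] at hbx
  refine ⟨⟨hrip, hc, hi, j + 1, by omega, hbx⟩, ?_⟩
  rw [hbx, UInt64.toNat_ofNat', UInt64.toNat_ofNat']
  omega

end Vorbis.Spec.decode_residue_10
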